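-- pv_equiv track=rewrite | github.com/AegypiusMonachus/PAY-SYSTEM | main/app/api_0_1/resources/statistical_api.py | data_d2
-- ===== SOURCE A (Python) =====
-- def data_d2(fn1, fn2):
--     dict1 = {a[0]: a for a in fn1}
--     dict2 = {a[0]: a for a in fn2}
--
--     for i in fn1:
--         for b in fn2:
--             if b[0] in dict1 and b[0] == i[0]:
--                 dict1[i[0]].append(b[1])
--         if i[0] not in dict2:
--             dict1[i[0]].append(0)
--     data_1 = list(dict1.values())
--     return data_1
-- ===== SOURCE B (Python) =====
-- def data_d2(fn1, fn2):
--     # Index fn2 once: key -> list of its second-column values (for keys present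
--     # in fn1), plus the set of all fn2 keys; then one pass over fn1 assembles
--     # each output row without mutating the arguments.
--     keys1 = {r[0] for r in fn1}
--     keys2 = set()
--     matches = {}
--     for b in fn2:
--         keys2.add(b[0])
--         if b[0] in keys1:
--             matches.setdefault(b[0], []).append(b[1])
--     return [r + (matches.get(r[0], []) if r[0] in keys2 else [0]) for r in fn1]
-- ===== Notes on version B (the rewrite author's own statement) =====
-- stated objective: alternative
-- what changed: Replaces A's nested loop over fn2 inside the loop over fn1 by one pass over fn2 building a key->matched-values index plus a key set and one map over fn1; Pre_ excludes inputs where A raises IndexError (empty rows, length-1 fn2 rows with a key from fn1) and fn1 lists with duplicate keys, on which A's repeated appends to the one shared dict row per key are accidental.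
-- outside the precondition, e.g. on data_d2([[1, 10], [1, 20]], []): A returns [[1, 20, 0, 0]], B returns [[1, 10, 0], [1, 20, 0]]
import Mathlib
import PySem

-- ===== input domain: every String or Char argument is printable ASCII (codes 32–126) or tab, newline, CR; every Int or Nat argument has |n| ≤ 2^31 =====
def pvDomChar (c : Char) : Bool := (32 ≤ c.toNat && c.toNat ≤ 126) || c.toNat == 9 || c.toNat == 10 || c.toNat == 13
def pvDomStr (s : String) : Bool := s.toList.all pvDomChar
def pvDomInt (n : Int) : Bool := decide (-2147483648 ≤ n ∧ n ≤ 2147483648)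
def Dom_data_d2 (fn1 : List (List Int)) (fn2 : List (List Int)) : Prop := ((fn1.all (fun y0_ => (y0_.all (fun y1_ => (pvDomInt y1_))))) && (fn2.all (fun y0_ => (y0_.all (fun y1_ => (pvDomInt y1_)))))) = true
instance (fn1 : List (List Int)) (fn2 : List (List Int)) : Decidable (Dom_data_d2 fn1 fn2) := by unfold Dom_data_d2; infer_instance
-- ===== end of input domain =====

-- B replaces A's nested scan by a precomputed key→matches index built in one pass
-- over fn2, then a single map over fn1 (return value only: A appends to fn1's rows
-- in place, B does not mutate its arguments).

-- r[0] (rows admitted by Pre_ are nonempty, so the default is never returned there)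
def pvKey (r : List Int) : Int := (PySem.List.pyGet? r 0).getD 0
-- b[1] (Pre_ guarantees length ≥ 2 whenever this is reached)
def pvV1 (r : List Int) : Int := (PySem.List.pyGet? r 1).getD 0

-- ===== PORT A =====
def data_d2 (fn1 : List (List Int)) (fn2 : List (List Int)) : List (List Int) :=
  let dict1 : PySem.Dict Int (List Int) :=
    fn1.foldl (fun d a => d.insert (pvKey a) a) PySem.Dict.empty
  let dict2 : PySem.Dict Int (List Int) :=
    fn2.foldl (fun d a => d.insert (pvKey a) a) PySem.Dict.empty
  let dict1' : PySem.Dict Int (List Int) :=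
    fn1.foldl (fun d i =>
      let d' := fn2.foldl (fun d b =>
        if d.contains (pvKey b) && (pvKey b == pvKey i)
        then d.modify (pvKey i) [] (fun v => v ++ [pvV1 b]) else d) d
      if !dict2.contains (pvKey i)
      then d'.modify (pvKey i) [] (fun v => v ++ [0]) else d') dict1
  dict1'.values

-- ===== PORT B =====
def data_d2_alt (fn1 : List (List Int)) (fn2 : List (List Int)) : List (List Int) :=
  let keys1 : PySem.Set Int := PySem.Set.ofList (fn1.map pvKey)
  let sm :=
    fn2.foldl (fun (sm : PySem.Set Int × PySem.Dict Int (List Int)) b =>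
      (PySem.Set.add sm.1 (pvKey b),
       if PySem.Set.contains keys1 (pvKey b)
       then sm.2.modify (pvKey b) [] (fun v => v ++ [pvV1 b]) else sm.2))
      (PySem.Set.empty, PySem.Dict.empty)
  fn1.map (fun r =>
    r ++ (if PySem.Set.contains sm.1 (pvKey r)
          then sm.2.getD (pvKey r) [] else [0]))

-- ===== PRECONDITION & SPEC =====
-- Pre_ excludes (a) the inputs where the Python A raises IndexError: an empty row
-- (a[0]), or an fn2 row of length 1 whose key occurs among fn1's keys (b[1]); and
-- (b) fn1 lists with duplicate keys, on which A's repeated appends to the one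
-- shared dict row per key are an accident of its dict-and-mutation implementation.
def Pre_data_d2 (fn1 : List (List Int)) (fn2 : List (List Int)) : Prop :=
  (∀ r ∈ fn1, r ≠ []) ∧ (fn1.map List.headI).Nodup ∧
  ∀ r ∈ fn2, r ≠ [] ∧ (r.headI ∈ fn1.map List.headI → 2 ≤ r.length)
instance (fn1 : List (List Int)) (fn2 : List (List Int)) : Decidable (Pre_data_d2 fn1 fn2) := by
  unfold Pre_data_d2; infer_instance
def pvWitness_data_d2 : List (List Int) × List (List Int) :=
  ([[1, 10], [2, 20]], [[1, 5], [3, 7], [1, 6]])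

def Spec_data_d2 (fn1 : List (List Int)) (fn2 : List (List Int)) (out : List (List Int)) : Prop := out = data_d2_alt fn1 fn2
instance (fn1 : List (List Int)) (fn2 : List (List Int)) (out : List (List Int)) : Decidable (Spec_data_d2 fn1 fn2 out) := by unfold Spec_data_d2; infer_instance

-- ===== CLAIM (what is proved, stated in full; the proofs are below) =====
def Claim_equal_data_d2 : Prop := ∀ (fn1 : List (List Int)) (fn2 : List (List Int)), Dom_data_d2 fn1 fn2 → Pre_data_d2 fn1 fn2 → Spec_data_d2 fn1 fn2 (data_d2 fn1 fn2)

-- ===== LEMMAS AND PROOFS =====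

def lastRowD (l : List (List Int)) (k : Int) : List Int :=
  (l.reverse.find? (fun r => pvKey r == k)).getD []

lemma dict1_get? (l : List (List Int)) (k : Int) :
    (l.foldl (fun d a => d.insert (pvKey a) a) PySem.Dict.empty).get? k =
      if k ∈ l.map pvKey then some (lastRowD l k) else none := by
  induction l using List.reverseRecOn with
  | nil => simp [PySem.Dict.get?_empty]
  | append_singleton xs a ih =>
    rw [List.foldl_append]
    simp only [List.foldl_cons, List.foldl_nil]
    rw [PySem.Dict.get?_insert, ih]
    by_cases hk : k = pvKey a
    · simp [hk, lastRowD]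
    · simp [hk, lastRowD, beq_false_of_ne (fun h => hk h.symm)]

def msA (fn2 : List (List Int)) (k : Int) : List Int :=
  (fn2.filter (fun b => pvKey b == k)).map pvV1

lemma innerA_getD (fn2 : List (List Int)) (ki : Int) :
    ∀ (d : PySem.Dict Int (List Int)), d.contains ki = true → ∀ k,
    (fn2.foldl (fun d b =>
        if d.contains (pvKey b) && (pvKey b == ki)
        then d.modify ki [] (fun v => v ++ [pvV1 b]) else d) d).getD k [] =
      d.getD k [] ++ (if k = ki then msA fn2 ki else []) := by
  induction fn2 with
  | nil => intro d h k; simp [msA]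
  | cons b l ih =>
    intro d h k
    simp only [List.foldl_cons]
    by_cases hb : pvKey b = ki
    · have hc : d.contains (pvKey b) = true := by rw [hb]; exact h
      simp only [hb, h, BEq.rfl, Bool.and_self, if_true]
      rw [ih _ (by simp [PySem.Dict.contains_modify, h]) k,
        PySem.Dict.getD_modify]
      by_cases hk : k = ki <;> simp [hk, msA, hb]
    · have : (pvKey b == ki) = false := beq_false_of_ne hb
      simp only [this, Bool.and_false, Bool.false_eq_true, if_false]
      rw [ih d h k]
      simp [msA, this]

lemma innerA_keys (fn2 : List (List Int)) (ki : Int) :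
    ∀ (d : PySem.Dict Int (List Int)),
    (fn2.foldl (fun d b =>
        if d.contains (pvKey b) && (pvKey b == ki)
        then d.modify ki [] (fun v => v ++ [pvV1 b]) else d) d).keys = d.keys := by
  induction fn2 with
  | nil => intro d; rfl
  | cons b l ih =>
    intro d
    simp only [List.foldl_cons]
    by_cases hc : (d.contains (pvKey b) && (pvKey b == ki)) = true
    · have hb : pvKey b = ki := by
        have := (Bool.and_eq_true _ _).mp hc
        exact eq_of_beq this.2
      have hki : d.contains ki = true := by
        have := (Bool.and_eq_true _ _).mp hc
        rw [← hb]; exact this.1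
      simp only [hc, if_true]
      rw [ih, PySem.Dict.keys_modify, PySem.Dict.keys_insert_of_contains]
      simpa [PySem.Dict.contains_modify] using hki
    · simp only [Bool.not_eq_true] at hc
      simp only [hc]
      exact ih d

lemma dict_contains_congr {d1 d2 : PySem.Dict Int (List Int)} (h : d1.keys = d2.keys)
    (k : Int) : d1.contains k = d2.contains k := by
  rw [PySem.Dict.contains_eq_decide_mem_keys, PySem.Dict.contains_eq_decide_mem_keys, h]

def commonApp (fn2 : List (List Int)) (k : Int) : List Int :=
  msA fn2 k ++ (if k ∈ fn2.map pvKey then [] else [0])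

lemma outerA_keys (fn2 : List (List Int)) (dict2c : Int → Bool) :
    ∀ (l : List (List Int)) (d : PySem.Dict Int (List Int)),
    (∀ i ∈ l, d.contains (pvKey i) = true) →
    (l.foldl (fun d i =>
        let d' := fn2.foldl (fun d b =>
          if d.contains (pvKey b) && (pvKey b == pvKey i)
          then d.modify (pvKey i) [] (fun v => v ++ [pvV1 b]) else d) d
        if !dict2c (pvKey i)
        then d'.modify (pvKey i) [] (fun v => v ++ [0]) else d') d).keys = d.keys := by
  intro l
  induction l with
  | nil => intro d _; rfl
  | cons i l ih =>
    intro d hl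
    simp only [List.foldl_cons]
    have hki : d.contains (pvKey i) = true := hl i (by simp)
    have hk1 : (fn2.foldl (fun d b =>
          if d.contains (pvKey b) && (pvKey b == pvKey i)
          then d.modify (pvKey i) [] (fun v => v ++ [pvV1 b]) else d) d).keys = d.keys :=
      innerA_keys fn2 (pvKey i) d
    by_cases hz : dict2c (pvKey i) = true
    · simp only [hz, Bool.not_true, Bool.false_eq_true, if_false]
      rw [ih _ (fun j hj => by rw [dict_contains_congr hk1]; exact hl j (by simp [hj]))]
      exact hk1
    · simp only [Bool.not_eq_true] at hz
      simp only [hz, Bool.not_false, if_true]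
      have hkm : ((fn2.foldl (fun d b =>
          if d.contains (pvKey b) && (pvKey b == pvKey i)
          then d.modify (pvKey i) [] (fun v => v ++ [pvV1 b]) else d) d).modify (pvKey i) []
            (fun v => v ++ [0])).keys = d.keys := by
        rw [PySem.Dict.keys_modify, PySem.Dict.keys_insert_of_contains, hk1]
        rw [dict_contains_congr hk1]; exact hki
      rw [ih _ (fun j hj => by rw [dict_contains_congr hkm]; exact hl j (by simp [hj]))]
      exact hkm

lemma outerA_getD (fn2 : List (List Int)) (dict2c : Int → Bool)
    (hc : ∀ k, dict2c k = decide (k ∈ fn2.map pvKey)) :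
    ∀ (l : List (List Int)) (d : PySem.Dict Int (List Int)),
    (∀ i ∈ l, d.contains (pvKey i) = true) → ∀ k,
    (l.foldl (fun d i =>
        let d' := fn2.foldl (fun d b =>
          if d.contains (pvKey b) && (pvKey b == pvKey i)
          then d.modify (pvKey i) [] (fun v => v ++ [pvV1 b]) else d) d
        if !dict2c (pvKey i)
        then d'.modify (pvKey i) [] (fun v => v ++ [0]) else d') d).getD k [] =
      d.getD k [] ++ (List.replicate ((l.map pvKey).count k) (commonApp fn2 k)).flatten := by
  intro l
  induction l with
  | nil => intro d _ k; simp
  | cons i l ih =>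
    intro d hl k
    simp only [List.foldl_cons]
    have hki : d.contains (pvKey i) = true := hl i (by simp)
    set dIn := fn2.foldl (fun d b =>
          if d.contains (pvKey b) && (pvKey b == pvKey i)
          then d.modify (pvKey i) [] (fun v => v ++ [pvV1 b]) else d) d with hdIn
    have hk1 : dIn.keys = d.keys := innerA_keys fn2 (pvKey i) d
    have hIn : ∀ k, dIn.getD k [] = d.getD k [] ++ (if k = pvKey i then msA fn2 (pvKey i) else []) :=
      innerA_getD fn2 (pvKey i) d hki
    have hstep : ∀ (e : PySem.Dict Int (List Int)),
        e.keys = d.keys →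
        (∀ k, e.getD k [] = d.getD k [] ++ (if k = pvKey i then commonApp fn2 (pvKey i) else [])) →
        (l.foldl (fun d i =>
          let d' := fn2.foldl (fun d b =>
            if d.contains (pvKey b) && (pvKey b == pvKey i)
            then d.modify (pvKey i) [] (fun v => v ++ [pvV1 b]) else d) d
          if !dict2c (pvKey i)
          then d'.modify (pvKey i) [] (fun v => v ++ [0]) else d') e).getD k [] =
          d.getD k [] ++ (List.replicate (((i :: l).map pvKey).count k) (commonApp fn2 k)).flatten := by
      intro e hek heg
      rw [ih e (fun j hj => by rw [dict_contains_congr hek]; exact hl j (by simp [hj])) k]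
      rw [heg k]
      by_cases hk : k = pvKey i
      · subst hk
        simp [List.append_assoc, List.replicate_succ]
      · have : (pvKey i == k) = false := beq_false_of_ne (fun h => hk h.symm)
        simp [hk, List.count_cons, this]
    by_cases hz : dict2c (pvKey i) = true
    · simp only [hz, Bool.not_true, Bool.false_eq_true, if_false]
      refine hstep dIn hk1 (fun k' => ?_)
      rw [hIn k']
      have hmem : pvKey i ∈ fn2.map pvKey := by
        have := hc (pvKey i); rw [hz] at this; exact of_decide_eq_true this.symm
      simp [commonApp, hmem]
    · simp only [Bool.not_eq_true] at hz
      simp only [hz, Bool.not_false, if_true]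
      have hmem : pvKey i ∉ fn2.map pvKey := by
        have := hc (pvKey i); rw [hz] at this
        exact of_decide_eq_false this.symm
      refine hstep _ ?_ (fun k' => ?_)
      · rw [PySem.Dict.keys_modify, PySem.Dict.keys_insert_of_contains, hk1]
        rw [dict_contains_congr hk1]; exact hki
      · rw [PySem.Dict.getD_modify, hIn k', hIn (pvKey i)]
        by_cases hk : k' = pvKey i <;> simp [hk, commonApp, hmem]

lemma matches_getD (fn1 fn2 : List (List Int)) (k : Int) (hk : k ∈ fn1.map pvKey) :
    (fn2.foldl (fun m b =>
        if PySem.Set.contains (PySem.Set.ofList (fn1.map pvKey)) (pvKey b)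
        then m.modify (pvKey b) [] (fun v => v ++ [pvV1 b]) else m)
        PySem.Dict.empty).getD k [] = msA fn2 k := by
  simp only [PySem.List.foldl_if_eq_foldl_filter]
  rw [show (List.foldl (fun m b => m.modify (pvKey b) [] (fun v => v ++ [pvV1 b]))
      PySem.Dict.empty
      (fn2.filter (fun b => PySem.Set.contains (PySem.Set.ofList (fn1.map pvKey)) (pvKey b))))
    = (List.foldl (fun m p => m.modify p.1 [] (fun v => v ++ [p.2]))
      PySem.Dict.empty
      ((fn2.filter (fun b => PySem.Set.contains (PySem.Set.ofList (fn1.map pvKey)) (pvKey b))).map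
        (fun b => (pvKey b, pvV1 b)))) from (List.foldl_map (f := fun b => (pvKey b, pvV1 b)) (g := fun (m : PySem.Dict Int (List Int)) (p : Int × Int) => m.modify p.1 [] fun v => v ++ [p.2])).symm]
  rw [PySem.Dict.getD_foldl_modify_append]
  rw [PySem.Dict.getD_empty, List.nil_append]
  rw [List.filter_map, List.map_map]
  unfold msA
  rw [List.filter_filter]
  congr 1
  apply List.filter_congr
  intro b _
  simp only [Function.comp]
  by_cases hb : pvKey b = k
  · have : PySem.Set.contains (PySem.Set.ofList (fn1.map pvKey)) (pvKey b) = true := by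
      rw [hb]
      simp [PySem.Set.contains, PySem.Set.mem_ofList, hk]
    have hx : ∃ a ∈ fn1, pvKey a = k := by simpa using hk
    simp [hb, hx]
  · simp [beq_false_of_ne hb]

lemma foldl_add_nodup (xs : List Int) : ∀ (s : PySem.Set Int),
    (∀ x ∈ xs, x ∉ s) → xs.Nodup →
    xs.foldl PySem.Set.add s = s ++ xs := by
  induction xs with
  | nil => intro s _ _; simp
  | cons x t ih =>
    intro s hni hnd
    have hx : x ∉ s := hni x (by simp)
    have hadd : PySem.Set.add s x = s ++ [x] := by
      simp [PySem.Set.add, PySem.Set.contains, hx]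
    simp only [List.foldl_cons, hadd]
    rw [ih (s ++ [x]) ?_ hnd.of_cons]
    · simp
    · intro y hy
      simp only [List.mem_append, List.mem_singleton]
      rintro (h | rfl)
      · exact hni y (by simp [hy]) h
      · exact (List.nodup_cons.mp hnd).1 hy

lemma ofList_nodup_id (xs : List Int) (h : xs.Nodup) :
    PySem.Set.ofList xs = xs := by
  rw [PySem.Set.ofList_eq_foldl, foldl_add_nodup xs [] (by simp) h, List.nil_append]

lemma lastRowD_eq (fn1 : List (List Int)) (hnd : (fn1.map pvKey).Nodup)
    (r : List Int) (hr : r ∈ fn1) : lastRowD fn1 (pvKey r) = r := by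
  unfold lastRowD
  cases hq : fn1.reverse.find? (fun x => pvKey x == pvKey r) with
  | none =>
    exfalso
    have := List.find?_eq_none.mp hq r (by simpa using hr)
    simp at this
  | some x =>
    have hx : x ∈ fn1 := by
      have := List.mem_of_find?_eq_some hq
      simpa using this
    have hkx : pvKey x = pvKey r := by
      have := List.find?_some hq
      exact eq_of_beq this
    have hinj := List.inj_on_of_nodup_map hnd
    simp [hinj hx hr hkx]

lemma msA_nil (fn2 : List (List Int)) (k : Int) (h : k ∉ fn2.map pvKey) :
    msA fn2 k = [] := by
  unfold msA
  have h0 : fn2.filter (fun b => pvKey b == k) = [] :=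
    List.filter_eq_nil_iff.mpr (fun b hb hbe => h (eq_of_beq hbe ▸ List.mem_map_of_mem hb))
  rw [h0]; rfl

theorem data_main (fn1 fn2 : List (List Int)) (hnd : (fn1.map pvKey).Nodup) :
    data_d2 fn1 fn2 = data_d2_alt fn1 fn2 := by
  simp only [data_d2, data_d2_alt]
  rw [PySem.List.foldl_prod_mk
    (f := fun (s : PySem.Set Int) (b : List Int) => PySem.Set.add s (pvKey b))
    (g := fun (m : PySem.Dict Int (List Int)) (b : List Int) =>
      if PySem.Set.contains (PySem.Set.ofList (fn1.map pvKey)) (pvKey b)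
      then m.modify (pvKey b) [] (fun v => v ++ [pvV1 b]) else m)]
  set dict1 : PySem.Dict Int (List Int) :=
    fn1.foldl (fun d a => d.insert (pvKey a) a) PySem.Dict.empty with hd1
  set dict2 : PySem.Dict Int (List Int) :=
    fn2.foldl (fun d a => d.insert (pvKey a) a) PySem.Dict.empty with hd2
  have hk1 : dict1.keys = PySem.Set.ofList (fn1.map pvKey) := by
    rw [hd1, PySem.Dict.keys_foldl_insert_key fn1 pvKey (fun _ a => a) PySem.Dict.empty,
      PySem.Dict.keys_empty]
    rfl
  have hnd1 : dict1.keys.Nodup := by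
    rw [hd1]
    exact PySem.Dict.nodup_keys_foldl_insert_key fn1 pvKey _ _ PySem.Dict.nodup_keys_empty
  have hcont2 : ∀ k, dict2.contains k = decide (k ∈ fn2.map pvKey) := by
    intro k
    rw [PySem.Dict.contains_eq_decide_mem_keys, hd2,
      PySem.Dict.keys_foldl_insert_key fn2 pvKey (fun _ a => a) PySem.Dict.empty,
      PySem.Dict.keys_empty]
    simp
  have hl : ∀ i ∈ fn1, dict1.contains (pvKey i) = true := by
    intro i hi
    rw [PySem.Dict.contains_eq_decide_mem_keys, hk1]
    simp [PySem.Set.mem_ofList]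
    exact ⟨i, hi, rfl⟩
  have hkeys' := outerA_keys fn2 (fun k => dict2.contains k) fn1 dict1 hl
  have hgd := outerA_getD fn2 (fun k => dict2.contains k) hcont2 fn1 dict1 hl
  rw [PySem.Dict.values_eq_map_keys _ (by rw [hkeys']; exact hnd1) [], hkeys', hk1]
  conv_lhs => rw [ofList_nodup_id _ hnd]
  rw [List.map_map]
  have hkeys2 : (fn2.foldl (fun (s : PySem.Set Int) b => PySem.Set.add s (pvKey b))
      PySem.Set.empty) = PySem.Set.ofList (fn2.map pvKey) := by
    rw [PySem.Set.ofList, List.foldl_map]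
  rw [hkeys2]
  apply List.map_congr_left
  intro r hr
  simp only [Function.comp]
  rw [hgd (pvKey r)]
  rw [PySem.Dict.getD_eq_get?_getD, hd1, dict1_get? fn1 (pvKey r),
    if_pos (List.mem_map_of_mem hr), Option.getD_some, lastRowD_eq fn1 hnd r hr]
  rw [List.count_eq_one_of_mem hnd (List.mem_map_of_mem hr)]
  rw [matches_getD fn1 fn2 (pvKey r) (List.mem_map_of_mem hr)]
  simp only [List.replicate_one, List.flatten_cons, List.flatten_nil, List.append_nil]
  congr 1
  unfold commonApp
  by_cases hm : pvKey r ∈ fn2.map pvKey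
  · have : PySem.Set.contains (PySem.Set.ofList (fn2.map pvKey)) (pvKey r) = true := by
      simp [PySem.Set.contains, PySem.Set.mem_ofList, hm]
    simp [hm]
  · have : PySem.Set.contains (PySem.Set.ofList (fn2.map pvKey)) (pvKey r) = false := by
      simp [PySem.Set.contains, PySem.Set.mem_ofList, hm]
    simp [hm, msA_nil fn2 (pvKey r) hm]

-- ===== VERDICT (by name: the statement is the Claim_ definition above) =====
theorem data_d2_spec : Claim_equal_data_d2 := by
  intro fn1 fn2 _ hpre
  have hnd : (fn1.map pvKey).Nodup := by
    have h := hpre.2.1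
    have he : fn1.map pvKey = fn1.map List.headI := by
      apply List.map_congr_left
      intro r hr
      have hne := hpre.1 r hr
      cases r with
      | nil => exact absurd rfl hne
      | cons x t => simp [pvKey, PySem.List.pyGet?, PySem.List.pyIdx?]
    rw [he]; exact h
  exact data_main fn1 fn2 hnd
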